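-- pv_equiv track=rewrite | github.com/AmanicX/EveAI | doc_builder.py | remove_title_line
-- ===== SOURCE A (Python) =====
-- def remove_title_line(text: str) -> str:
--     lines   = (text or "").splitlines()
--     cleaned = []
--     removed = False
--     for line in lines:
--         if not removed and line.strip().upper().startswith("TITLE:"):
--             removed = True
--             continue
--         cleaned.append(line)
--     return "\n".join(cleaned).strip()
-- ===== SOURCE B (Python) =====
-- def remove_title_line(text: str) -> str:
--     it = iter((text or "").splitlines())
--     prefix = []
--     for line in it:
--         if line.strip().upper().startswith("TITLE:"):
--             # first TITLE: line found: everything after it is kept verbatim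
--             return "\n".join(prefix + list(it)).strip()
--         prefix.append(line)
--     # loop exhausted the iterator: no TITLE: line anywhere
--     return "\n".join(prefix).strip()
-- ===== Notes on version B (the rewrite author's own statement) =====
-- stated objective: idiomatic
-- what changed: B consumes the lines through a single iterator: it accumulates lines only up to the first TITLE: line and, on finding it, returns immediately by draining the rest of the iterator verbatim, so the match test and the flag disappear after the hit, unlike A's flag-checked filtering of every line.
import Mathlib
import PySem

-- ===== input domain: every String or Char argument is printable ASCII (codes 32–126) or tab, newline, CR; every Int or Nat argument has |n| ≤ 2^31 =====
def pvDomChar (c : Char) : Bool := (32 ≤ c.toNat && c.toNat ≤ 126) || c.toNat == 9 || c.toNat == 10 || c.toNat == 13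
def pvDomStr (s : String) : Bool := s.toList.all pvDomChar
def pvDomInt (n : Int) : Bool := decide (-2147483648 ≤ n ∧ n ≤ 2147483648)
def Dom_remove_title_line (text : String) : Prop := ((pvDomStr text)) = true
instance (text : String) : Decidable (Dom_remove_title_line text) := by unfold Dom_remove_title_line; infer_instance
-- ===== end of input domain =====

-- B drains a single iterator: it collects lines until the first "TITLE:" line and then returns at once
-- with the rest of the iterator appended verbatim, replacing A's flag-checked filtering of every line; same O(n), plainer.

-- ===== PORT A =====
-- the loop's test: line.strip().upper().startswith("TITLE:")
def rtl_isTitle (line : String) : Bool :=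
  PySem.Str.startswith (PySem.Str.upper (PySem.Str.strip line)) "TITLE:"

-- one iteration of A's loop over the state (cleaned, removed)
def rtl_step (st : List String × Bool) (line : String) : List String × Bool :=
  if !st.2 && rtl_isTitle line then (st.1, true)
  else (st.1 ++ [line], st.2)

def remove_title_line (text : String) : String :=
  let lines := PySem.Str.splitlines text   -- (text or "") ≡ text for splitlines
  let st := lines.foldl rtl_step ([], false)
  PySem.Str.strip (PySem.Str.join "\n" st.1)

-- ===== PORT B =====
-- B's for-loop over the iterator: returns the accumulated prefix and, if a TITLE: line was hit,
-- `some rest` = the unconsumed remainder of the iterator (the early return); `none` = loop ran out (for-else path).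
def rtl_drain : List String → List String × Option (List String)
  | [] => ([], none)
  | h :: t =>
    if rtl_isTitle h then ([], some t)
    else
      let (p, r) := rtl_drain t
      (h :: p, r)

def remove_title_line_alt (text : String) : String :=
  match rtl_drain (PySem.Str.splitlines text) with
  | (prefix_, some rest) => PySem.Str.strip (PySem.Str.join "\n" (prefix_ ++ rest))
  | (prefix_, none) => PySem.Str.strip (PySem.Str.join "\n" prefix_)

-- ===== PRECONDITION & SPEC =====
def Spec_remove_title_line (text : String) (out : String) : Prop := out = remove_title_line_alt text
instance (text : String) (out : String) : Decidable (Spec_remove_title_line text out) := by unfold Spec_remove_title_line; infer_instance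

-- ===== CLAIM (what is proved, stated in full; the proofs are below) =====
def Claim_equal_remove_title_line : Prop := ∀ (text : String), Dom_remove_title_line text → Spec_remove_title_line text (remove_title_line text)

-- ===== LEMMAS AND PROOFS =====

theorem rtl_foldl_true (lines : List String) (acc : List String) :
    lines.foldl rtl_step (acc, true) = (acc ++ lines, true) := by
  induction lines generalizing acc with
  | nil => simp
  | cons l rest ih => rw [List.foldl_cons]; simp only [rtl_step, Bool.not_true,
      Bool.false_and, Bool.false_eq_true, reduceIte]; rw [ih]; simp

theorem rtl_foldl_false (lines : List String) (acc : List String) :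
    (lines.foldl rtl_step (acc, false)).1 =
    acc ++ (match rtl_drain lines with
      | (p, some rest) => p ++ rest
      | (p, none) => p) := by
  induction lines generalizing acc with
  | nil => simp [rtl_drain]
  | cons l rest ih =>
    rw [List.foldl_cons]
    by_cases h : rtl_isTitle l
    · simp only [rtl_step, Bool.not_false, Bool.true_and, h, reduceIte, rtl_drain]
      rw [rtl_foldl_true]
      simp
    · simp only [rtl_step, Bool.not_false, Bool.true_and, h, Bool.false_eq_true,
        reduceIte, rtl_drain]
      rw [ih]
      cases hf : rtl_drain rest with
      | mk p r => cases r <;> simp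

-- ===== VERDICT (by name: the statement is the Claim_ definition above) =====
theorem remove_title_line_spec : Claim_equal_remove_title_line := by
  intro text _
  unfold Spec_remove_title_line remove_title_line remove_title_line_alt
  simp only []
  rw [rtl_foldl_false (PySem.Str.splitlines text) []]
  cases hf : rtl_drain (PySem.Str.splitlines text) with
  | mk p r => cases r <;> simp
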